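-- pv_equiv track=rewrite | github.com/JianxinZhang02/financial_analysis_agent | scripts/collect_sec_filings.py | _filing_records
-- ===== SOURCE A (Python) =====
-- def _filing_records(filings: dict[str, list[str]]) -> list[dict[str, str]]:
--     forms = filings.get("form", [])
--     return [
--         {
--             "form": form,
--             "reportDate": filings.get("reportDate", [""] * len(forms))[idx],
--             "filingDate": filings.get("filingDate", [""] * len(forms))[idx],
--             "accessionNumber": filings.get("accessionNumber", [""] * len(forms))[idx],
--             "primaryDocument": filings.get("primaryDocument", [""] * len(forms))[idx],
--         }
--         for idx, form in enumerate(forms)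
--     ]
-- ===== SOURCE B (Python) =====
-- def _filing_records(filings):
--     forms = filings.get("form", [])
--     n = len(forms)
--     records = [{"form": form} for form in forms]
--     for name in ("reportDate", "filingDate", "accessionNumber", "primaryDocument"):
--         column = filings.get(name, [""] * n)
--         for idx in range(n):
--             records[idx][name] = column[idx]
--     return records
-- ===== Notes on version B (the rewrite author's own statement) =====
-- stated objective: alternative
-- what changed: A builds each record row-wise in one comprehension that re-fetches all four columns per row; B first builds skeleton {'form': f} records and then fills one field column at a time (each column fetched once) across all records by positional index.
import Mathlib
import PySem

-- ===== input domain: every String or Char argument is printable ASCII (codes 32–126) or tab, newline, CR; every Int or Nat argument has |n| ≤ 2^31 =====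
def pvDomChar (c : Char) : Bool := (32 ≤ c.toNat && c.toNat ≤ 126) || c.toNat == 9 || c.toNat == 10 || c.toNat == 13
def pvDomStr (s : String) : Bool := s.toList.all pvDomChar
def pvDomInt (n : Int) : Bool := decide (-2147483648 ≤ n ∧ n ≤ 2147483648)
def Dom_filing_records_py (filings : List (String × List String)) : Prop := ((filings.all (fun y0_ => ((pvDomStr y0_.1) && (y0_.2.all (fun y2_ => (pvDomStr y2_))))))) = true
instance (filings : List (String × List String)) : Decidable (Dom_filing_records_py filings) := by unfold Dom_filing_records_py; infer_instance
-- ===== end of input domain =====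

-- B replaces A's row-wise comprehension (four dict lookups per row) by skeleton records filled
-- column by column, each column fetched once; same values, alternative decomposition (no speed claim).

-- ===== PORT A =====
-- Literal port of A: one comprehension over enumerate(forms), re-fetching every column per row.
-- The in-range subscript column[idx] is pyGetD; out-of-range (IndexError) inputs are excluded by Pre_.
def filing_records_py (filings : List (String × List String)) : List (List (String × String)) :=
  let d := PySem.Dict.mk filings
  let forms := d.getD "form" []
  (PySem.List.enumerate forms).map (fun p =>
    [("form", p.2),
     ("reportDate", PySem.List.pyGetD (d.getD "reportDate" (List.replicate forms.length "")) p.1 ""),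
     ("filingDate", PySem.List.pyGetD (d.getD "filingDate" (List.replicate forms.length "")) p.1 ""),
     ("accessionNumber", PySem.List.pyGetD (d.getD "accessionNumber" (List.replicate forms.length "")) p.1 ""),
     ("primaryDocument", PySem.List.pyGetD (d.getD "primaryDocument" (List.replicate forms.length "")) p.1 "")])

-- ===== PORT B =====
def pvFieldNames : List String := ["reportDate", "filingDate", "accessionNumber", "primaryDocument"]

-- Literal port of B: skeleton records {"form": form}, then for each field name one positional
-- pass assigning records[idx][name] = column[idx] (pyGetD; IndexError inputs excluded by Pre_).
def filing_records_py_alt (filings : List (String × List String)) : List (List (String × String)) :=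
  let d := PySem.Dict.mk filings
  let forms := d.getD "form" []
  let n := forms.length
  let records := forms.map (fun form => PySem.Dict.mk [("form", form)])
  let filled := pvFieldNames.foldl (fun recs name =>
    let column := d.getD name (List.replicate n "")
    (PySem.List.pyRange 0 (n : Int) 1).foldl (fun rs idx =>
      rs.set idx.toNat ((rs.getD idx.toNat PySem.Dict.empty).insert name
        (PySem.List.pyGetD column idx ""))) recs) records
  filled.map PySem.Dict.items

-- ===== PRECONDITION & SPEC =====
-- Pre_ excludes exactly the inputs on which the Python A raises IndexError: a present field
-- column strictly shorter than the "form" column (the missing-key default has full length).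
def Pre_filing_records_py (filings : List (String × List String)) : Prop :=
  ∀ name ∈ (["reportDate", "filingDate", "accessionNumber", "primaryDocument"] : List String),
    ((PySem.Dict.mk filings).getD "form" []).length ≤
      (((PySem.Dict.mk filings).get? name).getD
        (List.replicate ((PySem.Dict.mk filings).getD "form" []).length "")).length
instance (filings : List (String × List String)) : Decidable (Pre_filing_records_py filings) := by
  unfold Pre_filing_records_py; infer_instance

def pvWitness_filing_records_py : (List (String × List String)) :=
  [("form", ["10-K", "8-K"]), ("filingDate", ["2024-01-02", "2024-03-04"]),
   ("accessionNumber", ["0001-24", "0002-24"])]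

def Spec_filing_records_py (filings : List (String × List String)) (out : List (List (String × String))) : Prop := out = filing_records_py_alt filings
instance (filings : List (String × List String)) (out : List (List (String × String))) : Decidable (Spec_filing_records_py filings out) := by unfold Spec_filing_records_py; infer_instance

-- ===== CLAIM (what is proved, stated in full; the proofs are below) =====
def Claim_equal_filing_records_py : Prop := ∀ (filings : List (String × List String)), Dom_filing_records_py filings → Pre_filing_records_py filings → Spec_filing_records_py filings (filing_records_py filings)

-- ===== LEMMAS AND PROOFS =====

theorem pv_mapIdx_ext {α β : Type} (f g : Nat → α → β) (l : List α)
    (h : ∀ i x, f i x = g i x) : l.mapIdx f = l.mapIdx g := by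
  apply List.ext_getElem (by simp)
  intro i h1 h2
  simp [List.getElem_mapIdx, h]

-- a positional fill loop 'for k in ...: rs[k] = f(k, rs[k])' over all of rs is a mapIdx
theorem pv_setfold {α : Type} (f : Nat → α → α) (d0 : α) :
    ∀ (rs pre : List α),
      (List.range' pre.length rs.length).foldl
        (fun acc k => acc.set k (f k (acc.getD k d0))) (pre ++ rs)
      = pre ++ rs.mapIdx (fun j x => f (pre.length + j) x) := by
  intro rs
  induction rs with
  | nil => intro pre; simp
  | cons x rs ih =>
    intro pre
    have hget : (pre ++ x :: rs).getD pre.length d0 = x := by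
      simp
    have hset : (pre ++ x :: rs).set pre.length (f pre.length x)
        = (pre ++ [f pre.length x]) ++ rs := by
      simp
    have := ih (pre ++ [f pre.length x])
    simp only [List.length_append, List.length_cons, List.length_nil, Nat.zero_add] at this ⊢
    rw [List.range'_succ, List.foldl_cons, hget, hset, this]
    simp only [List.append_assoc, List.cons_append, List.nil_append, List.mapIdx_cons]
    congr 2
    exact pv_mapIdx_ext _ _ rs (fun i y => by congr 1; omega)

-- a loop of positional assignments preserves the list's length
theorem pv_fold_length {α : Type} (F : List α → Int → α) :
    ∀ (l : List Int) (rs : List α),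
      (l.foldl (fun acc i => acc.set i.toNat (F acc i)) rs).length = rs.length := by
  intro l
  induction l with
  | nil => intro rs; simp
  | cons i l ih => intro rs; simp [ih]

-- one column-fill pass of B, 'for idx in range(n): records[idx][name] = column[idx]', is a mapIdx
theorem pv_fill_pass (name : String) (column : List String) (n : Nat)
    (rs : List (PySem.Dict String String)) (hlen : rs.length = n) :
    (PySem.List.pyRange 0 (n : Int) 1).foldl (fun rs idx =>
        rs.set idx.toNat ((rs.getD idx.toNat PySem.Dict.empty).insert name
          (PySem.List.pyGetD column idx ""))) rs
    = rs.mapIdx (fun k r => r.insert name (PySem.List.pyGetD column (k : Int) "")) := by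
  rw [PySem.List.pyRange_one]
  simp only [Int.sub_zero, Int.toNat_natCast, List.foldl_map, Int.zero_add]
  have h0 := pv_setfold
    (fun k r => PySem.Dict.insert r name (PySem.List.pyGetD column (k : Int) ""))
    PySem.Dict.empty rs []
  simp only [List.length_nil, List.nil_append, Nat.zero_add] at h0
  rw [← hlen, List.range_eq_range']
  simpa using h0

-- ===== VERDICT (by name: the statement is the Claim_ definition above) =====
theorem filing_records_py_spec : Claim_equal_filing_records_py := by
  intro filings _hDom _hPre
  unfold Spec_filing_records_py filing_records_py filing_records_py_alt
  simp only [pvFieldNames, List.foldl_cons, List.foldl_nil]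
  rw [pv_fill_pass _ _ _ _ (by simp [pv_fold_length])]
  rw [pv_fill_pass _ _ _ _ (by simp [pv_fold_length])]
  rw [pv_fill_pass _ _ _ _ (by simp [pv_fold_length])]
  rw [pv_fill_pass _ _ _ _ (by simp)]
  apply List.ext_getElem (by simp [PySem.List.length_enumerate])
  intro k h1 h2
  simp [PySem.List.getElem_enumerate, List.getElem_mapIdx, PySem.Dict.insert, PySem.Dict.contains]
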